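-- pv_equiv track=rewrite | github.com/imnaoj/whtesting | whtapi/app/utils/base62.py | encode_base62
-- ===== SOURCE A (Python) =====
-- ALPHABET = "0123456789ABCDEFGHIJKLMNOPQRSTUVWXYZabcdefghijklmnopqrstuvwxyz"
--
-- def encode_base62(num):
--     """Encode a number in Base62"""
--     if num == 0:
--         return ALPHABET[0]
--
--     arr = []
--     base = len(ALPHABET)
--     while num:
--         num, rem = divmod(num, base)
--         arr.append(ALPHABET[rem])
--     arr.reverse()
--     return ''.join(arr)
-- ===== SOURCE B (Python) =====
-- ALPHABET = "0123456789ABCDEFGHIJKLMNOPQRSTUVWXYZabcdefghijklmnopqrstuvwxyz"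
--
-- def encode_base62(num):
--     """Encode a number in Base62"""
--     if num == 0:
--         return ALPHABET[0]
--     return _rec(num)
--
-- def _rec(n):
--     if n == 0:
--         return ""
--     return _rec(n // 62) + ALPHABET[n % 62]
-- ===== Notes on version B (the rewrite author's own statement) =====
-- stated objective: simpler
-- what changed: Replaces the append-then-reverse loop with a direct recursion on the quotient that emits digits most-significant-first, so no list, no reverse() and no join are needed.
import Mathlib
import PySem

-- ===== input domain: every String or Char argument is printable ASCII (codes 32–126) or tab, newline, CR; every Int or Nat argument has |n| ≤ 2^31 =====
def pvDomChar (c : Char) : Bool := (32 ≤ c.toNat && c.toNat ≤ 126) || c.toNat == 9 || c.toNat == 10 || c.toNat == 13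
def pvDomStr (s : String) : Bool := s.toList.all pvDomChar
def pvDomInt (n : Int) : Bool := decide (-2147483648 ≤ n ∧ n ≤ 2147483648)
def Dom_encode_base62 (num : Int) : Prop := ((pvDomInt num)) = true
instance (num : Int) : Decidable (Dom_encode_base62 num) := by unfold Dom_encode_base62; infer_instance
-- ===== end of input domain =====

-- B replaces A's append-then-reverse digit loop by a direct recursion on the quotient
-- that emits digits most-significant-first (objective: simpler).


-- ===== PORT A =====
def pvAlphabet : List Char := "0123456789ABCDEFGHIJKLMNOPQRSTUVWXYZabcdefghijklmnopqrstuvwxyz".toList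

-- the 'while num:' loop; the 'num < 0' branch only makes the function total
-- (Python loops forever there, excluded by Pre_)
def encA_loop (num : Int) (arr : List Char) : List Char :=
  if num = 0 then arr
  else if num < 0 then arr
  else
    let q := PySem.Int.floordiv num 62
    let r := PySem.Int.mod num 62
    encA_loop q (arr ++ [(PySem.List.pyGet? pvAlphabet r).getD ' '])
termination_by num.toNat
decreasing_by
  simp [PySem.Int.floordiv, Int.fdiv_eq_ediv]
  omega

def encode_base62 (num : Int) : String :=
  if num = 0 then String.ofList [(PySem.List.pyGet? pvAlphabet 0).getD ' ']
  else String.ofList ((encA_loop num []).reverse)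

-- ===== PORT B =====
-- the '_rec' helper; the 'num < 0' guard only makes it total (Python hits RecursionError there, excluded by Pre_)
def encB_rec (n : Int) : String :=
  if n = 0 then ""
  else if n < 0 then ""
  else encB_rec (PySem.Int.floordiv n 62) ++ String.ofList [(PySem.List.pyGet? pvAlphabet (PySem.Int.mod n 62)).getD ' ']
termination_by n.toNat
decreasing_by
  simp [PySem.Int.floordiv, Int.fdiv_eq_ediv]
  omega

def encode_base62_alt (num : Int) : String :=
  if num = 0 then String.ofList [(PySem.List.pyGet? pvAlphabet 0).getD ' ']
  else encB_rec num

-- ===== PRECONDITION & SPEC =====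
-- Pre_ excludes negative inputs: there A loops forever (divmod floors, so num sticks at -1)
-- and B's recursion never reaches its base case (RecursionError); neither returns.
def Pre_encode_base62 (num : Int) : Prop := 0 ≤ num
instance (num : Int) : Decidable (Pre_encode_base62 num) := by unfold Pre_encode_base62; infer_instance
def pvWitness_encode_base62 : Int := (5)

def Spec_encode_base62 (num : Int) (out : String) : Prop := out = encode_base62_alt num
instance (num : Int) (out : String) : Decidable (Spec_encode_base62 num out) := by unfold Spec_encode_base62; infer_instance

-- ===== CLAIM (what is proved, stated in full; the proofs are below) =====
def Claim_equal_encode_base62 : Prop := ∀ (num : Int), Dom_encode_base62 num → Pre_encode_base62 num → Spec_encode_base62 num (encode_base62 num)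

-- ===== LEMMAS AND PROOFS =====

-- A's loop collects B's digit string in reverse, appended after arr
theorem encA_loop_eq (k : Nat) (num : Int) (arr : List Char) (hk : num.toNat ≤ k) (h : 0 ≤ num) :
    encA_loop num arr = arr ++ (encB_rec num).toList.reverse := by
  induction k generalizing num arr with
  | zero =>
    have h0 : num = 0 := by omega
    simp [h0, encA_loop, encB_rec]
  | succ k ih =>
    by_cases h0 : num = 0
    · simp [h0, encA_loop, encB_rec]
    · have hneg : ¬ num < 0 := by omega
      rw [encA_loop, encB_rec]
      simp only [if_neg h0, if_neg hneg]
      rw [ih _ _ (by simp [PySem.Int.floordiv, Int.fdiv_eq_ediv]; omega)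
            (by simp [PySem.Int.floordiv, Int.fdiv_eq_ediv]; omega)]
      simp

theorem encode_base62_spec : Claim_equal_encode_base62 := by
  intro num _ hpre
  unfold Spec_encode_base62 encode_base62 encode_base62_alt
  by_cases h0 : num = 0
  · simp [h0]
  · simp only [if_neg h0]
    rw [encA_loop_eq num.toNat num [] le_rfl hpre]
    simp
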